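-- pv_equiv track=rewrite | github.com/josephmate/AdventOfCode2018 | 11/chronal_charge.py | fastReuseComputeTotalPower
-- ===== SOURCE A (Python) =====
-- def fastReuseComputeTotalPower(previous, current, size):
--     totalPowerGrid = []
--     for y in range(0, 300 - size + 1):
--         xs = []
--         for x in range(0, 300 - size + 1):
--             totalPower = 0
--             for subY in range (0, 2):
--                 for subX in range (0, 2):
--                     totalPower += current[y+subY][x+subX]
--             # at this point totalPower has counted each cell for size 5
--             # this many times:
--             # 1 2 2 2 1
--             # 2 4 4 4 2
--             # 2 4 4 4 2
--             # 2 4 4 4 2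
--             # 1 2 2 2 1
--             # need to correct it with 4, 3x3=(size-2)x(size-2)
--             # 0 1 1 1 0     0 1 1 1 0   0 0 0 0 0   0 0 0 0 0   0 0 0 0 0
--             # 1 2 3 2 1     0 1 1 1 0   0 0 1 1 1   0 0 0 0 0   1 1 1 0 0
--             # 1 3 4 3 1  =  0 1 1 1 0   0 0 1 1 1   0 1 1 1 0   1 1 1 0 0
--             # 1 2 3 2 1     0 0 0 0 0   0 0 1 1 1   0 1 1 1 0   1 1 1 0 0
--             # 0 1 1 1 0     0 0 0 0 0   0 0 0 0 0   0 1 1 1 0   0 0 0 0 0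
--             # looks like my idea doesnt work
--             # we might have to do everything with the slower method
--
--             xs.append(totalPower)
--         totalPowerGrid.append(xs)
--     return totalPowerGrid
-- ===== SOURCE B (Python) =====
-- def fastReuseComputeTotalPower(previous, current, size):
--     n = 300 - size + 1
--     # horizontal pair sums: H[y][x] = current[y][x] + current[y][x+1];
--     # each 2x2 window sum is then one vertical pair of H entries.
--     H = [[current[y][x] + current[y][x + 1] for x in range(n)]
--          for y in range(n + 1)]
--     return [[H[y][x] + H[y + 1][x] for x in range(n)] for y in range(n)]
-- ===== Notes on version B (the rewrite author's own statement) =====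
-- stated objective: faster
-- what changed: Replaces the 4-term inner double loop per cell with precomputed horizontal pair sums H, so each output cell is one addition of two H entries (halving the adds) and the whole thing is two comprehension passes instead of four nested loops.
import Mathlib
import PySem

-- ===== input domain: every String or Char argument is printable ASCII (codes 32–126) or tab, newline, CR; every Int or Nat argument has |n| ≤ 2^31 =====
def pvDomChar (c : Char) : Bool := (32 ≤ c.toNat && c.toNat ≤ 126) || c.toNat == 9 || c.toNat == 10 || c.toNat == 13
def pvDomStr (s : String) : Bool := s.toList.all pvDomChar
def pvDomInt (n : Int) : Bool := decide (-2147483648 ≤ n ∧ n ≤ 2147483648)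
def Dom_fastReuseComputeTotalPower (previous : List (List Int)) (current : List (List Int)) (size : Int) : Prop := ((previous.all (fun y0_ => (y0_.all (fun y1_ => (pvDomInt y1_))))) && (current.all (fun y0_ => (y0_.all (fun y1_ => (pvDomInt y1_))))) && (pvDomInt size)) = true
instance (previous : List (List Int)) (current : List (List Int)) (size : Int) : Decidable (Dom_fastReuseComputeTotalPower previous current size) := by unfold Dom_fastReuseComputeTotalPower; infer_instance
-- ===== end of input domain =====

-- B replaces the per-cell 2x2 double loop by precomputed horizontal pair sums
-- (one addition of two H entries per output cell); return-value equivalence.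

-- ===== PORT A =====
def fastReuseComputeTotalPower (previous : List (List Int)) (current : List (List Int)) (size : Int) : List (List Int) :=
  (PySem.List.pyRange 0 (300 - size + 1) 1).foldl (fun totalPowerGrid y =>
    totalPowerGrid ++ [(PySem.List.pyRange 0 (300 - size + 1) 1).foldl (fun xs x =>
      xs ++ [(PySem.List.pyRange 0 2 1).foldl (fun totalPower subY =>
        (PySem.List.pyRange 0 2 1).foldl (fun totalPower subX =>
          totalPower + PySem.List.pyGetD (PySem.List.pyGetD current (y + subY) []) (x + subX) 0)
        totalPower) 0]) []]) []

-- ===== PORT B =====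
def fastReuseComputeTotalPower_alt (previous : List (List Int)) (current : List (List Int)) (size : Int) : List (List Int) :=
  let n := 300 - size + 1
  let H := (PySem.List.pyRange 0 (n + 1) 1).map (fun y =>
    (PySem.List.pyRange 0 n 1).map (fun x =>
      PySem.List.pyGetD (PySem.List.pyGetD current y []) x 0 +
      PySem.List.pyGetD (PySem.List.pyGetD current y []) (x + 1) 0))
  (PySem.List.pyRange 0 n 1).map (fun y =>
    (PySem.List.pyRange 0 n 1).map (fun x =>
      PySem.List.pyGetD (PySem.List.pyGetD H y []) x 0 +
      PySem.List.pyGetD (PySem.List.pyGetD H (y + 1) []) x 0))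

-- ===== PRECONDITION & SPEC =====
-- Pre_ excludes exactly the inputs on which A raises IndexError: when the loops
-- run (size ≤ 300), A reads rows 0..301-size of current at columns 0..301-size.
def Pre_fastReuseComputeTotalPower (previous : List (List Int)) (current : List (List Int)) (size : Int) : Prop :=
  301 - size ≤ 0 ∨
    (302 - size ≤ (current.length : Int) ∧
      ∀ row ∈ current.take (302 - size).toNat, 302 - size ≤ (row.length : Int))
instance (previous : List (List Int)) (current : List (List Int)) (size : Int) : Decidable (Pre_fastReuseComputeTotalPower previous current size) := by unfold Pre_fastReuseComputeTotalPower; infer_instance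

def pvWitness_fastReuseComputeTotalPower : List (List Int) × List (List Int) × Int :=
  ([], [[1, 2], [3, 4]], 300)

def Spec_fastReuseComputeTotalPower (previous : List (List Int)) (current : List (List Int)) (size : Int) (out : List (List Int)) : Prop := out = fastReuseComputeTotalPower_alt previous current size
instance (previous : List (List Int)) (current : List (List Int)) (size : Int) (out : List (List Int)) : Decidable (Spec_fastReuseComputeTotalPower previous current size out) := by unfold Spec_fastReuseComputeTotalPower; infer_instance

-- ===== CLAIM (what is proved, stated in full; the proofs are below) =====
def Claim_equal_fastReuseComputeTotalPower : Prop := ∀ (previous : List (List Int)) (current : List (List Int)) (size : Int), Dom_fastReuseComputeTotalPower previous current size → Pre_fastReuseComputeTotalPower previous current size → Spec_fastReuseComputeTotalPower previous current size (fastReuseComputeTotalPower previous current size)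

-- ===== LEMMAS AND PROOFS =====

theorem pyRange_two : PySem.List.pyRange 0 2 1 = [0, 1] := by decide

theorem fastReuseComputeTotalPower_eq (previous current : List (List Int)) (size : Int) :
    fastReuseComputeTotalPower previous current size
      = fastReuseComputeTotalPower_alt previous current size := by
  unfold fastReuseComputeTotalPower fastReuseComputeTotalPower_alt
  simp only [PySem.List.foldl_append_singleton_eq_map, List.nil_append, pyRange_two,
    List.foldl_cons, List.foldl_nil]
  apply List.map_congr_left
  intro y hy
  apply List.map_congr_left
  intro x hx
  rw [PySem.List.mem_pyRange_one] at hy hx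
  obtain ⟨hy1, hy2⟩ := hy
  obtain ⟨hx1, hx2⟩ := hx
  rw [PySem.List.pyGetD_map_pyRange_of_nonneg _ _ (y + 1) ([] : List Int) (by omega) (by omega),
      PySem.List.pyGetD_map_pyRange_of_nonneg _ _ y ([] : List Int) (by omega) (by omega),
      PySem.List.pyGetD_map_pyRange_of_nonneg _ _ x (0 : Int) (by omega) (by omega),
      PySem.List.pyGetD_map_pyRange_of_nonneg _ _ x (0 : Int) (by omega) (by omega)]
  simp only [add_zero, zero_add]
  ring

-- ===== VERDICT (by name: the statement is the Claim_ definition above) =====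
theorem fastReuseComputeTotalPower_spec : Claim_equal_fastReuseComputeTotalPower := by
  intro previous current size _ _
  unfold Spec_fastReuseComputeTotalPower
  exact fastReuseComputeTotalPower_eq previous current size
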